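-- pv_equiv track=rewrite | github.com/princeton-pli/hal-harness | reliability_eval/analyze_compliance.py | extract_agent_name_from_run_dir
-- ===== SOURCE A (Python) =====
-- def extract_agent_name_from_run_dir(run_dir_name: str) -> str:
--     """Extract agent name from run directory name."""
--     parts = run_dir_name.split('_')
--
--     if run_dir_name.startswith('taubench_airline'):
--         agent_parts = parts[2:]
--     elif run_dir_name.startswith('taubench_retail'):
--         agent_parts = parts[2:]
--     else:
--         agent_parts = parts[1:]
--
--     # Remove 'compliance' and timestamp
--     filtered_parts = []
--     for i, part in enumerate(agent_parts):
--         if part == 'compliance':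
--             break  # Stop before 'compliance'
--         if part.isdigit() and i == len(agent_parts) - 1:
--             break  # Skip timestamp
--         filtered_parts.append(part)
--
--     return '_'.join(filtered_parts)
-- ===== SOURCE B (Python) =====
-- def extract_agent_name_from_run_dir(run_dir_name: str) -> str:
--     """Extract agent name from run directory name."""
--     parts = run_dir_name.split('_')
--     if run_dir_name.startswith(('taubench_airline', 'taubench_retail')):
--         agent_parts = parts[2:]
--     else:
--         agent_parts = parts[1:]
--
--     # Find the boundary (first 'compliance', or a trailing digit timestamp), then slice.
--     if 'compliance' in agent_parts:
--         kept = agent_parts[:agent_parts.index('compliance')]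
--     elif agent_parts and agent_parts[-1].isdigit():
--         kept = agent_parts[:-1]
--     else:
--         kept = agent_parts
--     return '_'.join(kept)
-- ===== Notes on version B (the rewrite author's own statement) =====
-- stated objective: simpler
-- what changed: A's fused enumerate-loop with two intermixed break conditions is replaced by a boundary-then-slice decomposition: find the first 'compliance' and slice before it, otherwise drop a trailing all-digit timestamp element, then join.
import Mathlib
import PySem

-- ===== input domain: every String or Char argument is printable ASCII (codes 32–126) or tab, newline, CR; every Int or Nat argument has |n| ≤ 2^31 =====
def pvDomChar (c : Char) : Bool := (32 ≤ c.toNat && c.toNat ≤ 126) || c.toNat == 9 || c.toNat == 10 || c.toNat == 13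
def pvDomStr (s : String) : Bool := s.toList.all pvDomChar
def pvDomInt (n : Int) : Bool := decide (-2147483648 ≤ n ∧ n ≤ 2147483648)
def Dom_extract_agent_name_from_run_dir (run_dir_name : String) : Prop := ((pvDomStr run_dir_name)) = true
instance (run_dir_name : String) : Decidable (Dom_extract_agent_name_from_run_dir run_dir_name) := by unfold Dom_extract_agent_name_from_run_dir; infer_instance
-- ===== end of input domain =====

-- B replaces A's fused accumulate-loop (with two intermixed break conditions) by a
-- boundary-find-then-slice decomposition; objective: simpler.


-- ===== PORT A =====
-- A's 'for i, part in enumerate(agent_parts): … break … break … append' loop,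
-- carrying the running index i and the fixed n = len(agent_parts)
def eaFilter : List String → Nat → Nat → List String
  | [], _, _ => []
  | p :: rest, i, n =>
    if p = "compliance" then []
    else if PySem.Str.strIsdigit p ∧ i = n - 1 then []
    else p :: eaFilter rest (i + 1) n

def extract_agent_name_from_run_dir (run_dir_name : String) : String :=
  let parts := (PySem.Str.split? run_dir_name "_").getD []
  let agent_parts :=
    if PySem.Str.startswith run_dir_name "taubench_airline" then
      PySem.List.slice parts (some 2) none
    else if PySem.Str.startswith run_dir_name "taubench_retail" then
      PySem.List.slice parts (some 2) none
    else
      PySem.List.slice parts (some 1) none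
  let filtered_parts := eaFilter agent_parts 0 agent_parts.length
  PySem.Str.join "_" filtered_parts

-- ===== PORT B =====
-- B's boundary-then-slice step: slice before the first 'compliance' if there is one,
-- otherwise drop a trailing all-digit timestamp element
def eaKept (ap : List String) : List String :=
  match PySem.List.index? ap "compliance" with
  | some k => PySem.List.slice ap none (some (k : Int))
  | none =>
    match ap.getLast? with
    | some last =>
      if PySem.Str.strIsdigit last then PySem.List.slice ap none (some (-1))
      else ap
    | none => ap

def extract_agent_name_from_run_dir_alt (run_dir_name : String) : String :=
  let parts := (PySem.Str.split? run_dir_name "_").getD []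
  let agent_parts :=
    if PySem.Str.startswith run_dir_name "taubench_airline" ||
       PySem.Str.startswith run_dir_name "taubench_retail" then
      PySem.List.slice parts (some 2) none
    else
      PySem.List.slice parts (some 1) none
  PySem.Str.join "_" (eaKept agent_parts)

-- ===== PRECONDITION & SPEC =====
def Spec_extract_agent_name_from_run_dir (run_dir_name : String) (out : String) : Prop := out = extract_agent_name_from_run_dir_alt run_dir_name
instance (run_dir_name : String) (out : String) : Decidable (Spec_extract_agent_name_from_run_dir run_dir_name out) := by unfold Spec_extract_agent_name_from_run_dir; infer_instance

-- ===== CLAIM (what is proved, stated in full; the proofs are below) =====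
def Claim_equal_extract_agent_name_from_run_dir : Prop := ∀ (run_dir_name : String), Dom_extract_agent_name_from_run_dir run_dir_name → Spec_extract_agent_name_from_run_dir run_dir_name (extract_agent_name_from_run_dir run_dir_name)

-- ===== LEMMAS AND PROOFS =====

-- index-free characterisation of A's loop (the last element is exactly the one whose tail is empty)
def eaG : List String → List String
  | [] => []
  | p :: rest =>
    if p = "compliance" then []
    else if rest = [] then (if PySem.Str.strIsdigit p then [] else [p])
    else p :: eaG rest

theorem eaFilter_eq_eaG : ∀ (ap : List String) (i : Nat), eaFilter ap i (i + ap.length) = eaG ap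
  | [], _ => rfl
  | p :: rest, i => by
    rw [eaFilter, eaG]
    by_cases hc : p = "compliance"
    · rw [if_pos hc, if_pos hc]
    · rw [if_neg hc, if_neg hc]
      cases rest with
      | nil =>
        rw [if_pos rfl]
        by_cases hd : PySem.Chars.strIsdigit p.toList = true <;> simp [eaFilter, hd]
      | cons q rest' =>
        rw [if_neg (fun h => by have := h.2; simp only [List.length_cons] at this; omega),
            if_neg (by simp : ¬ (q :: rest') = [])]
        have hn : i + (p :: q :: rest').length = (i + 1) + (q :: rest').length := by
          simp [List.length_cons]; omega
        rw [hn, eaFilter_eq_eaG (q :: rest') (i + 1)]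

theorem eaG_eq_eaKept (ap : List String) : eaG ap = eaKept ap := by
  induction ap with
  | nil => rfl
  | cons p rest ih =>
    rw [eaG, eaKept]
    by_cases hc : p = "compliance"
    · subst hc
      rw [PySem.List.index?_cons_self]
      simp [PySem.List.slice_to]
    · rw [PySem.List.index?_cons_of_ne rest hc]
      cases rest with
      | nil =>
        rw [if_neg hc]
        simp only [PySem.List.index?_eq_idxOf?, List.idxOf?_nil, Option.map_none]
        by_cases hd : PySem.Chars.strIsdigit p.toList = true
        · simp [hd, PySem.List.slice_to_neg_one]
        · simp [hd]
      | cons q rest' =>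
        rw [if_neg hc, if_neg (by simp : ¬ (q :: rest') = []), ih, eaKept]
        cases hidx : PySem.List.index? (q :: rest') "compliance" with
        | some k =>
          simp only [Option.map_some]
          rw [PySem.List.slice_to_natCast, PySem.List.slice_to_natCast]
          simp [List.take_succ_cons]
        | none =>
          simp only [hidx, Option.map_none]
          rw [List.getLast?_cons_cons]
          cases hl : (q :: rest').getLast? with
          | none => simp at hl
          | some last =>
            by_cases hd : PySem.Chars.strIsdigit last.toList = true
            · simp [hd, PySem.List.slice_to_neg_one]
            · simp [hd]

theorem eaFilter_zero_eq_eaKept (ap : List String) : eaFilter ap 0 ap.length = eaKept ap := by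
  have h := eaFilter_eq_eaG ap 0
  rw [Nat.zero_add] at h
  rw [h, eaG_eq_eaKept]

-- ===== VERDICT (by name: the statement is the Claim_ definition above) =====
theorem extract_agent_name_from_run_dir_spec : Claim_equal_extract_agent_name_from_run_dir := by
  intro s _
  unfold Spec_extract_agent_name_from_run_dir
  unfold extract_agent_name_from_run_dir extract_agent_name_from_run_dir_alt
  by_cases h1 : PySem.Chars.startswith s.toList
      ['t','a','u','b','e','n','c','h','_','a','i','r','l','i','n','e'] = true <;>
  by_cases h2 : PySem.Chars.startswith s.toList
      ['t','a','u','b','e','n','c','h','_','r','e','t','a','i','l'] = true <;>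
    simp [h1, h2, eaFilter_zero_eq_eaKept]
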